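-- pv_equiv track=rewrite | github.com/ParaniDharshan04/Financial-Health-Assessment-Tool | backend/app/services/cash_flow_forecast.py | _get_forecast_recommendations
-- ===== SOURCE A (Python) =====
-- from typing import Dict, List
--
-- def _get_forecast_recommendations(forecast_months: List[Dict], risks: List[Dict]) -> List[str]:
--     """Get recommendations based on forecast"""
--
--     recommendations = []
--
--     if any(r['type'] == 'Negative Cash Flow' for r in risks):
--         recommendations.append('Urgent: Arrange additional financing or credit line')
--         recommendations.append('Accelerate receivables collection')
--         recommendations.append('Defer non-essential expenses')
--
--     if any(r['type'] == 'Declining Trend' for r in risks):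
--         recommendations.append('Review and optimize operating expenses')
--         recommendations.append('Focus on revenue generation activities')
--         recommendations.append('Improve working capital management')
--
--     if any(r['type'] == 'High Volatility' for r in risks):
--         recommendations.append('Build cash reserves for uncertain periods')
--         recommendations.append('Implement more frequent cash flow monitoring')
--         recommendations.append('Diversify revenue streams')
--
--     if not recommendations:
--         recommendations.append('Maintain current cash flow management practices')
--         recommendations.append('Continue monitoring monthly performance')
--         recommendations.append('Build emergency cash reserves')
--
--     return recommendations[:5]
-- ===== SOURCE B (Python) =====
-- from typing import Dict, List
--
-- _RISK_BITS = {'Negative Cash Flow': 1, 'Declining Trend': 2, 'High Volatility': 4}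
--
-- _BLOCKS = [
--     (1, ['Urgent: Arrange additional financing or credit line',
--          'Accelerate receivables collection',
--          'Defer non-essential expenses']),
--     (2, ['Review and optimize operating expenses',
--          'Focus on revenue generation activities',
--          'Improve working capital management']),
--     (4, ['Build cash reserves for uncertain periods',
--          'Implement more frequent cash flow monitoring',
--          'Diversify revenue streams']),
-- ]
--
-- _DEFAULT = ['Maintain current cash flow management practices',
--             'Continue monitoring monthly performance',
--             'Build emergency cash reserves']
--
-- # All 8 possible answers, precomputed once (default and [:5] folded in).
-- _OUTPUTS = [
--     ([rec for bit, block in _BLOCKS if mask & bit for rec in block] or _DEFAULT)[:5]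
--     for mask in range(8)
-- ]
--
-- def _get_forecast_recommendations(forecast_months: List[Dict], risks: List[Dict]) -> List[str]:
--     """Get recommendations based on forecast"""
--     mask = 0
--     for r in risks:
--         mask |= _RISK_BITS.get(r['type'], 0)
--     return list(_OUTPUTS[mask])
-- ===== Notes on version B (the rewrite author's own statement) =====
-- stated objective: alternative
-- what changed: Replaces the per-call if/append cascade by a single fold that ORs each risk type into a 3-bit mask, then answers by indexing a table of all 8 possible outputs precomputed once at module load (default and [:5] folded into the table).
import Mathlib
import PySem

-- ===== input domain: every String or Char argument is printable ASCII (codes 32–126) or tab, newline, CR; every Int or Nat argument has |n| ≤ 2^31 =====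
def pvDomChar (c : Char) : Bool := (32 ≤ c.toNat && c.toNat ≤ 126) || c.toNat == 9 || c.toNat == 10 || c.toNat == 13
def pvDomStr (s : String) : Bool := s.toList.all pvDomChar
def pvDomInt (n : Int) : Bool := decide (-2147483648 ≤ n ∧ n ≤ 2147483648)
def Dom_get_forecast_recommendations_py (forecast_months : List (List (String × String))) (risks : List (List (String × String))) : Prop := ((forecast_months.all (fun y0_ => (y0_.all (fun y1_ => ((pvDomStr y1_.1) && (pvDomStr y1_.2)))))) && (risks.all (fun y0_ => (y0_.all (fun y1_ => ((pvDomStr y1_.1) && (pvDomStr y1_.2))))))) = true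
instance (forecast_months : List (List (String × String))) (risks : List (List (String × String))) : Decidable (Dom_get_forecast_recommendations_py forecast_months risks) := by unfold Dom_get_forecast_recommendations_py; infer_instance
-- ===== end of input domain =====

-- B replaces A's per-call if/append cascade by a one-pass 3-bit risk mask and an
-- 8-entry precomputed output table (alternative decomposition; same cost).

-- ===== PORT A =====
-- literal transliteration of A: three any-checks, appends, default block, [:5]
def get_forecast_recommendations_py (forecast_months : List (List (String × String))) (risks : List (List (String × String))) : List String :=
  let recommendations : List String := []
  let recommendations :=
    if risks.any (fun r => List.lookup "type" r == some "Negative Cash Flow") then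
      recommendations ++ ["Urgent: Arrange additional financing or credit line",
                          "Accelerate receivables collection",
                          "Defer non-essential expenses"]
    else recommendations
  let recommendations :=
    if risks.any (fun r => List.lookup "type" r == some "Declining Trend") then
      recommendations ++ ["Review and optimize operating expenses",
                          "Focus on revenue generation activities",
                          "Improve working capital management"]
    else recommendations
  let recommendations :=
    if risks.any (fun r => List.lookup "type" r == some "High Volatility") then
      recommendations ++ ["Build cash reserves for uncertain periods",
                          "Implement more frequent cash flow monitoring",
                          "Diversify revenue streams"]
    else recommendations
  let recommendations :=
    if recommendations = [] then
      recommendations ++ ["Maintain current cash flow management practices",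
                          "Continue monitoring monthly performance",
                          "Build emergency cash reserves"]
    else recommendations
  recommendations.take 5

-- ===== PORT B =====
def pvRiskBits : List (String × Nat) :=
  [("Negative Cash Flow", 1), ("Declining Trend", 2), ("High Volatility", 4)]

def pvBlocks : List (Nat × List String) :=
  [(1, ["Urgent: Arrange additional financing or credit line",
        "Accelerate receivables collection",
        "Defer non-essential expenses"]),
   (2, ["Review and optimize operating expenses",
        "Focus on revenue generation activities",
        "Improve working capital management"]),
   (4, ["Build cash reserves for uncertain periods",
        "Implement more frequent cash flow monitoring",
        "Diversify revenue streams"])]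

def pvDefault : List String :=
  ["Maintain current cash flow management practices",
   "Continue monitoring monthly performance",
   "Build emergency cash reserves"]

-- the 8 precomputed outputs, one per mask value, as built in Source B's comprehension
def pvOutputs : List (List String) :=
  (List.range 8).map (fun mask =>
    (let recs := (pvBlocks.filter (fun p => mask &&& p.1 != 0)).flatMap (fun p => p.2)
     if recs = [] then pvDefault else recs).take 5)

-- r['type'] is ported as (List.lookup "type" r).getD "": exact under Pre_ (key present).
def get_forecast_recommendations_py_alt (forecast_months : List (List (String × String))) (risks : List (List (String × String))) : List String :=
  let mask := risks.foldl
    (fun m r => m ||| (List.lookup ((List.lookup "type" r).getD "") pvRiskBits).getD 0) 0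
  pvOutputs.getD mask []

-- ===== PRECONDITION & SPEC =====
-- Pre_ excludes inputs where some risk dict lacks the key 'type': Python A raises KeyError on
-- essentially all of them (it returns only when any()'s short-circuit hides the missing key,
-- an accident of evaluation order; B raises there).
def Pre_get_forecast_recommendations_py (forecast_months : List (List (String × String))) (risks : List (List (String × String))) : Prop :=
  ∀ r ∈ risks, (List.lookup "type" r).isSome
instance (forecast_months : List (List (String × String))) (risks : List (List (String × String))) : Decidable (Pre_get_forecast_recommendations_py forecast_months risks) := by unfold Pre_get_forecast_recommendations_py; infer_instance

def pvWitness_get_forecast_recommendations_py : (List (List (String × String))) × (List (List (String × String))) :=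
  ([], [[("type", "Negative Cash Flow")], [("type", "other")]])

def Spec_get_forecast_recommendations_py (forecast_months : List (List (String × String))) (risks : List (List (String × String))) (out : List String) : Prop := out = get_forecast_recommendations_py_alt forecast_months risks
instance (forecast_months : List (List (String × String))) (risks : List (List (String × String))) (out : List String) : Decidable (Spec_get_forecast_recommendations_py forecast_months risks out) := by unfold Spec_get_forecast_recommendations_py; infer_instance

-- ===== CLAIM (what is proved, stated in full; the proofs are below) =====
def Claim_equal_get_forecast_recommendations_py : Prop := ∀ (forecast_months : List (List (String × String))) (risks : List (List (String × String))), Dom_get_forecast_recommendations_py forecast_months risks → Pre_get_forecast_recommendations_py forecast_months risks → Spec_get_forecast_recommendations_py forecast_months risks (get_forecast_recommendations_py forecast_months risks)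

-- ===== LEMMAS AND PROOFS =====

-- the per-risk bit contribution
def pvBit (r : List (String × String)) : Nat :=
  (List.lookup ((List.lookup "type" r).getD "") pvRiskBits).getD 0

-- mask value for a triple of presence booleans
def pvMask (b1 b2 b3 : Bool) : Nat :=
  (if b1 then 1 else 0) ||| (if b2 then 2 else 0) ||| (if b3 then 4 else 0)

lemma pv_foldl_or_init (l : List (List (String × String))) :
    ∀ acc : Nat, l.foldl (fun m r => m ||| pvBit r) acc
      = acc ||| l.foldl (fun m r => m ||| pvBit r) 0 := by
  induction l with
  | nil => intro acc; simp
  | cons r rs ih =>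
      intro acc
      simp only [List.foldl_cons]
      rw [ih (acc ||| pvBit r), ih (0 ||| pvBit r)]
      simp [Nat.or_assoc]

lemma pv_mask_eq (risks : List (List (String × String))) :
    risks.foldl (fun m r => m ||| pvBit r) 0
      = pvMask (risks.any (fun r => List.lookup "type" r == some "Negative Cash Flow"))
               (risks.any (fun r => List.lookup "type" r == some "Declining Trend"))
               (risks.any (fun r => List.lookup "type" r == some "High Volatility")) := by
  induction risks with
  | nil => decide
  | cons r rs ih =>
      simp only [List.foldl_cons, List.any_cons]
      rw [pv_foldl_or_init, ih]
      cases h : List.lookup "type" r with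
      | none =>
          have hb : pvBit r = 0 := by simp only [pvBit, h, Option.getD_none]; decide
          simp [hb]
      | some v =>
          by_cases h1 : v = "Negative Cash Flow"
          · subst h1
            have hb : pvBit r = 1 := by simp only [pvBit, h, Option.getD_some]; decide
            simp only [hb]
            cases rs.any (fun r => List.lookup "type" r == some "Negative Cash Flow") <;>
              cases rs.any (fun r => List.lookup "type" r == some "Declining Trend") <;>
                cases rs.any (fun r => List.lookup "type" r == some "High Volatility") <;>
                  simp [pvMask]
          · by_cases h2 : v = "Declining Trend"
            · subst h2
              have hb : pvBit r = 2 := by simp only [pvBit, h, Option.getD_some]; decide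
              simp only [hb]
              cases rs.any (fun r => List.lookup "type" r == some "Negative Cash Flow") <;>
                cases rs.any (fun r => List.lookup "type" r == some "Declining Trend") <;>
                  cases rs.any (fun r => List.lookup "type" r == some "High Volatility") <;>
                    simp [pvMask]
            · by_cases h3 : v = "High Volatility"
              · subst h3
                have hb : pvBit r = 4 := by simp only [pvBit, h, Option.getD_some]; decide
                simp only [hb]
                cases rs.any (fun r => List.lookup "type" r == some "Negative Cash Flow") <;>
                  cases rs.any (fun r => List.lookup "type" r == some "Declining Trend") <;>
                    cases rs.any (fun r => List.lookup "type" r == some "High Volatility") <;>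
                      simp [pvMask]
              · have e1 : (v == "Negative Cash Flow") = false := beq_eq_false_iff_ne.mpr h1
                have e2 : (v == "Declining Trend") = false := beq_eq_false_iff_ne.mpr h2
                have e3 : (v == "High Volatility") = false := beq_eq_false_iff_ne.mpr h3
                have hb : pvBit r = 0 := by
                  simp [pvBit, h, pvRiskBits, List.lookup, e1, e2, e3]
                have hv1 : (some v == some "Negative Cash Flow") = false := by simp [h1]
                have hv2 : (some v == some "Declining Trend") = false := by simp [h2]
                have hv3 : (some v == some "High Volatility") = false := by simp [h3]
                simp [hb, hv1, hv2, hv3]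

-- ===== VERDICT (by name: the statement is the Claim_ definition above) =====
theorem get_forecast_recommendations_py_spec : Claim_equal_get_forecast_recommendations_py := by
  intro fm risks _hdom _hpre
  unfold Spec_get_forecast_recommendations_py get_forecast_recommendations_py get_forecast_recommendations_py_alt
  have := pv_mask_eq risks
  simp only [pvBit] at this
  rw [this]
  cases h1 : risks.any (fun r => List.lookup "type" r == some "Negative Cash Flow") <;>
    cases h2 : risks.any (fun r => List.lookup "type" r == some "Declining Trend") <;>
      cases h3 : risks.any (fun r => List.lookup "type" r == some "High Volatility") <;>
        simp [pvMask, pvOutputs, pvBlocks, pvDefault, List.range_succ]
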